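-- pv_equiv track=rewrite | github.com/hom1c1d3/yandex_lyceum | Основы программирования на языке Python/5. Отладчик/monkey_count.py | count_monkey_moves
-- ===== SOURCE A (Python) =====
-- def count_monkey_moves(n):
--     count = 0
--     while n > 1:
--         if n % 2 == 0:
--             n //= 2
--         else:
--             n -= 1
--         count += 1
--     return count
-- ===== SOURCE B (Python) =====
-- def count_monkey_moves(n):
--     # closed form: halving steps = bit_length-1, extra decrement steps = popcount-1
--     if n <= 1:
--         return 0
--     return (n.bit_length() - 1) + (bin(n).count("1") - 1)
-- ===== Notes on version B (the rewrite author's own statement) =====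
-- stated objective: simpler
-- what changed: Replaces the step-by-step halve/decrement loop with a closed form over the binary representation: (bit_length-1) shift steps plus (popcount-1) decrement steps, guarded by n<=1.
import Mathlib
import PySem

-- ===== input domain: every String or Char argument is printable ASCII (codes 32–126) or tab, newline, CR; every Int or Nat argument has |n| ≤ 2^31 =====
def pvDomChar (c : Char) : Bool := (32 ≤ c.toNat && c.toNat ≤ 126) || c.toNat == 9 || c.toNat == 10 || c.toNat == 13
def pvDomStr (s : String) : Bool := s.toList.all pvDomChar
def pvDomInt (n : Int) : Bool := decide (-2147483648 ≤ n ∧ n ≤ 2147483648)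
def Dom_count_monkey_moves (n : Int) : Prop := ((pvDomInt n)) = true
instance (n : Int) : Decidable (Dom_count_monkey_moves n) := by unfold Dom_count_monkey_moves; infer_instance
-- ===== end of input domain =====

-- B replaces A's halve/decrement loop with a closed form over n's binary representation (objective: simpler).

-- ===== PORT A =====
-- the while loop of A, carrying (n, count)
def cmmGo (n : Int) (count : Int) : Int :=
  if _h : n > 1 then
    cmmGo (if PySem.Int.mod n 2 = 0 then PySem.Int.floordiv n 2 else n - 1) (count + 1)
  else count
termination_by n.toNat
decreasing_by
  split
  · rw [PySem.Int.floordiv_eq_ediv_of_pos (by omega)]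
    omega
  · omega

def count_monkey_moves (n : Int) : Int := cmmGo n 0

-- ===== PORT B =====
def count_monkey_moves_alt (n : Int) : Int :=
  if n ≤ 1 then 0
  else ((PySem.Int.bitLength n : Int) - 1) + ((PySem.Int.bitCount n : Int) - 1)

-- ===== PRECONDITION & SPEC =====
def Spec_count_monkey_moves (n : Int) (out : Int) : Prop := out = count_monkey_moves_alt n
instance (n : Int) (out : Int) : Decidable (Spec_count_monkey_moves n out) := by unfold Spec_count_monkey_moves; infer_instance

-- ===== CLAIM (what is proved, stated in full; the proofs are below) =====
def Claim_equal_count_monkey_moves : Prop := ∀ (n : Int), Dom_count_monkey_moves n → Spec_count_monkey_moves n (count_monkey_moves n)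

-- ===== LEMMAS AND PROOFS =====

-- invariant of A's loop: for n > 1 it adds bitLength n + bitCount n - 2 to the accumulator
theorem cmmGo_eq : ∀ (k : Nat) (n c : Int), n.toNat ≤ k → 1 < n →
    cmmGo n c = c + (PySem.Int.bitLength n : Int) + (PySem.Int.bitCount n : Int) - 2 := by
  intro k
  induction k with
  | zero => intro n c hk hn; omega
  | succ k ih =>
    intro n c hk hn
    rw [cmmGo, dif_pos hn]
    have hfd : PySem.Int.floordiv n 2 = n / 2 := PySem.Int.floordiv_eq_ediv_of_pos (by omega)
    have hmod : PySem.Int.mod n 2 = n % 2 := PySem.Int.mod_eq_emod_of_pos (by omega)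
    have hbl := PySem.Int.bitLength_of_pos (n := n) (by omega)
    have hbc := PySem.Int.bitCount_of_pos (n := n) (by omega)
    rw [hfd, hmod] at *
    by_cases hev : n % 2 = 0
    · rw [if_pos hev]
      by_cases h2 : 1 < n / 2
      · rw [ih (n / 2) (c + 1) (by omega) h2]
        rw [hbl, hbc, hev]
        push_cast
        omega
      · -- n = 2 or n = 3 even → n = 2
        have hn2 : n = 2 := by omega
        subst hn2
        rw [cmmGo]
        have h1 : PySem.Int.bitLength 2 = 2 := by decide
        have h2 : PySem.Int.bitCount 2 = 1 := by decide
        rw [h1, h2]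
        simp [cmmGo]
        omega
    · rw [if_neg hev]
      -- n odd, n ≥ 3, so n - 1 > 1
      have hodd : n % 2 = 1 := by omega
      have hn3 : 3 ≤ n := by omega
      rw [ih (n - 1) (c + 1) (by omega) (by omega)]
      -- relate bitLength/bitCount of n-1 (even) to those of n (odd)
      have hfd' : PySem.Int.floordiv (n - 1) 2 = (n - 1) / 2 := PySem.Int.floordiv_eq_ediv_of_pos (by omega)
      have hmod' : PySem.Int.mod (n - 1) 2 = (n - 1) % 2 := PySem.Int.mod_eq_emod_of_pos (by omega)
      have hbl' := PySem.Int.bitLength_of_pos (n := n - 1) (by omega)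
      have hbc' := PySem.Int.bitCount_of_pos (n := n - 1) (by omega)
      rw [hfd', hmod'] at *
      have hsame : (n - 1) / 2 = n / 2 := by omega
      rw [hsame] at hbl' hbc'
      have hm0 : (n - 1) % 2 = 0 := by omega
      rw [hm0] at hbc'
      rw [hbl', hbc', hbl, hbc, hodd]
      push_cast
      omega

-- ===== VERDICT (by name: the statement is the Claim_ definition above) =====
theorem count_monkey_moves_spec : Claim_equal_count_monkey_moves := by
  intro n _
  unfold Spec_count_monkey_moves count_monkey_moves count_monkey_moves_alt
  by_cases h : n ≤ 1
  · rw [cmmGo, dif_neg (by omega), if_pos h]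
  · rw [if_neg h, cmmGo_eq n.toNat n 0 le_rfl (by omega)]
    omega
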